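-- pv_equiv track=rewrite | github.com/signer-hua/Auto-label | backend/models/grounding_dino_engine.py | _match_label_to_prompt
-- ===== SOURCE A (Python) =====
-- def _match_label_to_prompt(det_label: str, prompts: list[str]) -> int:
--     """将 Grounding DINO 输出的 label 匹配回输入的 text_prompts 索引。"""
--     det_label_lower = det_label.lower().strip()
--     for idx, prompt in enumerate(prompts):
--         if det_label_lower == prompt.lower().strip():
--             return idx
--     for idx, prompt in enumerate(prompts):
--         if prompt.lower().strip() in det_label_lower or det_label_lower in prompt.lower().strip():
--             return idx
--     return 0
-- ===== SOURCE B (Python) =====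
-- def _match_label_to_prompt(det_label: str, prompts: list[str]) -> int:
--     """Single pass: exact match returns immediately; first substring match kept as fallback."""
--     label = det_label.lower().strip()
--     fallback = None
--     for idx, prompt in enumerate(prompts):
--         p = prompt.lower().strip()
--         if label == p:
--             return idx
--         if fallback is None and (p in label or label in p):
--             fallback = idx
--     return fallback if fallback is not None else 0
-- ===== Notes on version B (the rewrite author's own statement) =====
-- stated objective: simpler
-- what changed: Replaces A's two full scans (exact-match scan, then substring scan, each re-normalizing every prompt) with one single pass that normalizes each prompt once, returns immediately on exact match and keeps the first substring match in a fallback variable.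
import Mathlib
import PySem

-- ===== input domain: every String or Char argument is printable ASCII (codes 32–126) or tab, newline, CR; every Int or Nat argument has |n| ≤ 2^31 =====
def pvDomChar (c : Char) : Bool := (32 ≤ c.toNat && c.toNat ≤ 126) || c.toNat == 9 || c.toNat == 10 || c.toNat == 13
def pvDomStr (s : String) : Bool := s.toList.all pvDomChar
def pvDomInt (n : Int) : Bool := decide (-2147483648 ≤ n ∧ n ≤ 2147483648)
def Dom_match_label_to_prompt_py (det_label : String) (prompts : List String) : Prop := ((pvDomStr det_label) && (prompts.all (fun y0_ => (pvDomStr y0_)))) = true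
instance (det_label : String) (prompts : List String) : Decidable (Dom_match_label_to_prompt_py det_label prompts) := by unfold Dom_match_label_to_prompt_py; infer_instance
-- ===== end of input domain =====

-- B changes A's two scans (exact, then substring, each re-normalizing prompts) into one pass
-- with an immediate exact return and a first-substring fallback variable (objective: simpler, one pass).

-- shared normalization: prompt.lower().strip()
def pvNorm (s : String) : String := PySem.Str.strip (PySem.Str.lower s)

-- ===== PORT A =====
-- first scan: exact equality
def pvLoopExact (d : String) (idx : Int) : List String → Option Int
  | [] => none
  | p :: rest => if d == pvNorm p then some idx else pvLoopExact d (idx + 1) rest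

-- second scan: bidirectional substring
def pvLoopSub (d : String) (idx : Int) : List String → Option Int
  | [] => none
  | p :: rest =>
    if PySem.Str.isIn (pvNorm p) d || PySem.Str.isIn d (pvNorm p) then some idx
    else pvLoopSub d (idx + 1) rest

def match_label_to_prompt_py (det_label : String) (prompts : List String) : Int :=
  let dl := pvNorm det_label
  match pvLoopExact dl 0 prompts with
  | some i => i
  | none =>
    match pvLoopSub dl 0 prompts with
    | some i => i
    | none => 0

-- ===== PORT B =====
-- single pass: exact match returns idx; first substring match recorded in fallback
def pvLoopB (d : String) (idx : Int) (fallback : Option Int) : List String → Int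
  | [] => fallback.getD 0
  | prompt :: rest =>
    let p := pvNorm prompt
    if d == p then idx
    else if fallback.isNone && (PySem.Str.isIn p d || PySem.Str.isIn d p) then
      pvLoopB d (idx + 1) (some idx) rest
    else
      pvLoopB d (idx + 1) fallback rest

def match_label_to_prompt_py_alt (det_label : String) (prompts : List String) : Int :=
  pvLoopB (pvNorm det_label) 0 none prompts

-- ===== PRECONDITION & SPEC =====
def Spec_match_label_to_prompt_py (det_label : String) (prompts : List String) (out : Int) : Prop := out = match_label_to_prompt_py_alt det_label prompts
instance (det_label : String) (prompts : List String) (out : Int) : Decidable (Spec_match_label_to_prompt_py det_label prompts out) := by unfold Spec_match_label_to_prompt_py; infer_instance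

-- ===== CLAIM (what is proved, stated in full; the proofs are below) =====
def Claim_equal_match_label_to_prompt_py : Prop := ∀ (det_label : String) (prompts : List String), Dom_match_label_to_prompt_py det_label prompts → Spec_match_label_to_prompt_py det_label prompts (match_label_to_prompt_py det_label prompts)

-- ===== LEMMAS AND PROOFS =====

-- once the fallback is set, B only looks for an exact match
lemma pvLoopB_some (d : String) (j : Int) : ∀ (ps : List String) (idx : Int),
    pvLoopB d idx (some j) ps = match pvLoopExact d idx ps with | some i => i | none => j := by
  intro ps
  induction ps with
  | nil => intro idx; simp [pvLoopB, pvLoopExact]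
  | cons p rest ih =>
    intro idx
    by_cases h : d == pvNorm p
    · simp [pvLoopB, pvLoopExact, h]
    · simp [pvLoopB, pvLoopExact, h, ih]

-- with no fallback yet, B computes A's combined answer from position idx on
lemma pvLoopB_none (d : String) : ∀ (ps : List String) (idx : Int),
    pvLoopB d idx none ps =
      match pvLoopExact d idx ps with
      | some i => i
      | none => match pvLoopSub d idx ps with | some i => i | none => 0 := by
  intro ps
  induction ps with
  | nil => intro idx; simp [pvLoopB, pvLoopExact, pvLoopSub]
  | cons p rest ih =>
    intro idx
    by_cases h : d == pvNorm p
    · simp [pvLoopB, pvLoopExact, h]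
    · by_cases hs : PySem.Chars.isIn (pvNorm p).toList d.toList = true ∨
          PySem.Chars.isIn d.toList (pvNorm p).toList = true
      · simp only [pvLoopB, pvLoopExact, pvLoopSub, h]
        simp only [PySem.Str.isIn_eq, Bool.or_eq_true, hs, if_true, if_false,
          Option.isNone_none, Bool.true_and, Bool.false_eq_true, pvLoopB_some d idx rest (idx + 1)]
      · simp [pvLoopB, pvLoopExact, pvLoopSub, h, hs, ih]

-- ===== VERDICT (by name: the statement is the Claim_ definition above) =====
theorem match_label_to_prompt_py_spec : Claim_equal_match_label_to_prompt_py := by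
  intro det_label prompts _
  unfold Spec_match_label_to_prompt_py match_label_to_prompt_py match_label_to_prompt_py_alt
  rw [pvLoopB_none]
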